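-- pv_equiv track=rewrite | github.com/arjunr10/eda-symbol_libraries | Liberty File Parser.py | get_cell_names
-- ===== SOURCE A (Python) =====
-- def get_cell_names(lib_file):# Takes liberty file and returns list of the cell names and a list of the indexes diving the liberty file into different sections for each cell
--     cell_names = []#Call name lists
--     list = lib_file
--     count_c = 0
--     cell_divisions = []#List contiang sections of the liberty file(stores indicies)
--     isComment = False
--     for x in list:
--         length = len(x)
--         for y in range(length):
--             if x[y:y+2] == '/*':#Making sure its not a comment
--                 isComment = True
--             if x[y:y+2] == '*/':
--                 isComment = False
--             if x[y:y+6] == 'cell (' and isComment == False:#Capturing cell name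
--                 cell_divisions.append(list.index(x))
--                 count_c=count_c+1
--                 name_end = x.find(')')
--                 cell_names.append(x[y+6:name_end])
--
--     return cell_names, cell_divisions
-- ===== SOURCE B (Python) =====
-- def get_cell_names(lib_file):
--     # Event-driven rewrite: str.find collects marker positions per line, then one
--     # sorted event walk replaces A's per-character slicing scan.
--     cell_names = []
--     cell_divisions = []
--     isComment = False
--     for x in lib_file:
--         events = []
--         for marker, kind in (('/*', 0), ('*/', 1), ('cell (', 2)):
--             start = 0
--             while True:
--                 p = x.find(marker, start)
--                 if p == -1:
--                     break
--                 events.append((p, kind))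
--                 start = p + 1
--         events.sort(key=lambda e: e[0])
--         for p, kind in events:
--             if kind == 0:
--                 isComment = True
--             elif kind == 1:
--                 isComment = False
--             elif not isComment:
--                 cell_divisions.append(lib_file.index(x))
--                 cell_names.append(x[p + 6:x.find(')')])
--     return cell_names, cell_divisions
-- ===== Notes on version B (the rewrite author's own statement) =====
-- stated objective: alternative
-- what changed: Replaces A's per-character scan (three slice comparisons at every index of every line) with str.find-driven collection of marker positions merged into one position-sorted event list that is walked once per line.
import Mathlib
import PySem

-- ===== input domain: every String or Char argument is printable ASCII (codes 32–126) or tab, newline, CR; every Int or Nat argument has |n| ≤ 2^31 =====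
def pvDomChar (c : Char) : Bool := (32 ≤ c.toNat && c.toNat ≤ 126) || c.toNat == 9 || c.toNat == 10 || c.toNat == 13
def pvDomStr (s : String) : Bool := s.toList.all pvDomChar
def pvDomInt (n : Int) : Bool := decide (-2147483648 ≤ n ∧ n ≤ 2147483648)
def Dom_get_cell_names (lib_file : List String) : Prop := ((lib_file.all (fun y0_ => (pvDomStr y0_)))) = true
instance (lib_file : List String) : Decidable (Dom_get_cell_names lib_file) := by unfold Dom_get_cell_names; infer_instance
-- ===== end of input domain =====

-- B replaces A's per-character triple-slice scan with find-collected marker events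
-- walked in position order once per line (objective: alternative algorithm, same cost).

-- ===== PORT A =====
-- A's state tuple in declaration order: (cell_names, count_c, cell_divisions, isComment)
def get_cell_names (lib_file : List String) : List String × List Int :=
  let fin := lib_file.foldl (fun (st : List String × Int × List Int × Bool) x =>
    let cs := x.toList
    let length := cs.length
    (List.range length).foldl (fun st (y : Nat) =>
      let st := if PySem.List.slice cs (some (y : Int)) (some ((y : Int) + 2)) = ['/', '*'] then
          (st.1, st.2.1, st.2.2.1, true) else st
      let st := if PySem.List.slice cs (some (y : Int)) (some ((y : Int) + 2)) = ['*', '/'] then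
          (st.1, st.2.1, st.2.2.1, false) else st
      if PySem.List.slice cs (some (y : Int)) (some ((y : Int) + 6)) = ['c', 'e', 'l', 'l', ' ', '('] ∧ st.2.2.2 = false then
        (st.1 ++ [String.ofList (PySem.List.slice cs (some ((y : Int) + 6)) (some (PySem.Chars.find cs [')'])))],
         st.2.1 + 1,
         st.2.2.1 ++ [(((PySem.List.index? lib_file x).getD 0 : Nat) : Int)],  -- list.index(x): x ∈ lib_file, so index? is never none
         st.2.2.2)
      else st) st)
    (([] : List String), (0 : Int), ([] : List Int), false)
  (fin.1, fin.2.2.1)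

-- ===== PORT B =====
-- the 'while True: p = x.find(marker, start) …' loop of Source B; fuel (cs.length + 1) only
-- makes the recursion structural, the loop body is unchanged
def pvFindAll (cs sub : List Char) (fuel : Nat) (start : Nat) : List Int :=
  match fuel with
  | 0 => []
  | fuel + 1 =>
    let p := PySem.Chars.findFrom cs sub (start : Int) none
    if p = -1 then [] else p :: pvFindAll cs sub fuel (p.toNat + 1)

-- B's state tuple: (cell_names, cell_divisions, isComment)
def get_cell_names_alt (lib_file : List String) : List String × List Int :=
  let fin := lib_file.foldl (fun (st : List String × List Int × Bool) x =>
    let cs := x.toList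
    let events := [((['/', '*'] : List Char), (0 : Int)), (['*', '/'], 1), (['c', 'e', 'l', 'l', ' ', '('], 2)].foldl
      (fun acc mk => acc ++ (pvFindAll cs mk.1 (cs.length + 1) 0).map (fun p => (p, mk.2))) []
    let events := PySem.List.sorted events (fun e => e.1) false
    events.foldl (fun st e =>
      if e.2 = 0 then (st.1, st.2.1, true)
      else if e.2 = 1 then (st.1, st.2.1, false)
      else if st.2.2 = false then
        (st.1 ++ [String.ofList (PySem.List.slice cs (some (e.1 + 6)) (some (PySem.Chars.find cs [')'])))],
         st.2.1 ++ [(((PySem.List.index? lib_file x).getD 0 : Nat) : Int)],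
         st.2.2)
      else st) st)
    (([] : List String), ([] : List Int), false)
  (fin.1, fin.2.1)

-- ===== PRECONDITION & SPEC =====
def Spec_get_cell_names (lib_file : List String) (out : List String × List Int) : Prop := out = get_cell_names_alt lib_file
instance (lib_file : List String) (out : List String × List Int) : Decidable (Spec_get_cell_names lib_file out) := by unfold Spec_get_cell_names; infer_instance

-- ===== CLAIM (what is proved, stated in full; the proofs are below) =====
def Claim_equal_get_cell_names : Prop := ∀ (lib_file : List String), Dom_get_cell_names lib_file → Spec_get_cell_names lib_file (get_cell_names lib_file)

-- ===== LEMMAS AND PROOFS =====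


-- step function of A's inner character loop (the port's lambda, named for the proofs)
def pvAstep (lib_file : List String) (x : String) (cs : List Char)
    (st : List String × Int × List Int × Bool) (y : Nat) : List String × Int × List Int × Bool :=
  let st := if PySem.List.slice cs (some (y : Int)) (some ((y : Int) + 2)) = ['/', '*'] then
      (st.1, st.2.1, st.2.2.1, true) else st
  let st := if PySem.List.slice cs (some (y : Int)) (some ((y : Int) + 2)) = ['*', '/'] then
      (st.1, st.2.1, st.2.2.1, false) else st
  if PySem.List.slice cs (some (y : Int)) (some ((y : Int) + 6)) = ['c', 'e', 'l', 'l', ' ', '('] ∧ st.2.2.2 = false then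
    (st.1 ++ [String.ofList (PySem.List.slice cs (some ((y : Int) + 6)) (some (PySem.Chars.find cs [')'])))],
     st.2.1 + 1,
     st.2.2.1 ++ [(((PySem.List.index? lib_file x).getD 0 : Nat) : Int)],
     st.2.2.2)
  else st

-- step function of B's event loop (the port's lambda, named for the proofs)
def pvBstep (lib_file : List String) (x : String) (cs : List Char)
    (st : List String × List Int × Bool) (e : Int × Int) : List String × List Int × Bool :=
  if e.2 = 0 then (st.1, st.2.1, true)
  else if e.2 = 1 then (st.1, st.2.1, false)
  else if st.2.2 = false then
    (st.1 ++ [String.ofList (PySem.List.slice cs (some (e.1 + 6)) (some (PySem.Chars.find cs [')'])))],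
     st.2.1 ++ [(((PySem.List.index? lib_file x).getD 0 : Nat) : Int)],
     st.2.2)
  else st

-- A's step at a position where some marker matches, dispatching on which marker
def pvCstep (lib_file : List String) (x : String) (cs : List Char)
    (st : List String × Int × List Int × Bool) (y : Nat) : List String × Int × List Int × Bool :=
  if ['/', '*'] <+: cs.drop y then (st.1, st.2.1, st.2.2.1, true)
  else if ['*', '/'] <+: cs.drop y then (st.1, st.2.1, st.2.2.1, false)
  else if st.2.2.2 = false then
    (st.1 ++ [String.ofList (PySem.List.slice cs (some ((y : Int) + 6)) (some (PySem.Chars.find cs [')'])))],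
     st.2.1 + 1,
     st.2.2.1 ++ [(((PySem.List.index? lib_file x).getD 0 : Nat) : Int)],
     st.2.2.2)
  else st

def pvHit (cs : List Char) (y : Nat) : Bool :=
  decide (['/', '*'] <+: cs.drop y) || decide (['*', '/'] <+: cs.drop y) ||
    decide (['c', 'e', 'l', 'l', ' ', '('] <+: cs.drop y)

def pvKind (cs : List Char) (y : Nat) : Int :=
  if ['/', '*'] <+: cs.drop y then 0 else if ['*', '/'] <+: cs.drop y then 1 else 2

def pvTag (cs : List Char) (y : Nat) : Int × Int := ((y : Int), pvKind cs y)

def pvProj (st : List String × Int × List Int × Bool) : List String × List Int × Bool :=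
  (st.1, st.2.2.1, st.2.2.2)

-- the ports, re-stated as folds of the named step functions (definitional)
lemma pv_A_eq (lib_file : List String) :
    get_cell_names lib_file =
      (let fin := lib_file.foldl (fun st x =>
          (List.range x.toList.length).foldl (pvAstep lib_file x x.toList) st)
        (([] : List String), (0 : Int), ([] : List Int), false)
       (fin.1, fin.2.2.1)) := rfl

lemma pv_B_eq (lib_file : List String) :
    get_cell_names_alt lib_file =
      (let fin := lib_file.foldl (fun st x =>
          (PySem.List.sorted
            ([((['/', '*'] : List Char), (0 : Int)), (['*', '/'], 1), (['c', 'e', 'l', 'l', ' ', '('], 2)].foldl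
              (fun acc mk => acc ++ (pvFindAll x.toList mk.1 (x.toList.length + 1) 0).map (fun p => (p, mk.2))) [])
            (fun e => e.1) false).foldl (pvBstep lib_file x x.toList) st)
        (([] : List String), ([] : List Int), false)
       (fin.1, fin.2.1)) := rfl

-- a slice test x[y:y+n] == sub is a prefix test at position y
lemma pv_slice_eq_iff (cs sub : List Char) (y n : Nat) (hn : sub.length = n) :
    PySem.List.slice cs (some (y : Int)) (some ((y : Int) + (n : Int))) = sub ↔ sub <+: cs.drop y := by
  rw [PySem.List.slice_natCast_add, List.prefix_iff_eq_take, ← hn, eq_comm]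

lemma pvAstep_eq (lib_file : List String) (x : String) (cs : List Char)
    (st : List String × Int × List Int × Bool) (y : Nat) :
    pvAstep lib_file x cs st y = if pvHit cs y then pvCstep lib_file x cs st y else st := by
  have h2 := pv_slice_eq_iff cs ['/', '*'] y 2 rfl
  have h2' := pv_slice_eq_iff cs ['*', '/'] y 2 rfl
  have h6 := pv_slice_eq_iff cs ['c', 'e', 'l', 'l', ' ', '('] y 6 rfl
  push_cast at h2 h2' h6
  unfold pvAstep pvCstep pvHit
  simp only [h2, h2', h6]
  by_cases c0 : ['/', '*'] <+: cs.drop y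
  · by_cases c1 : ['*', '/'] <+: cs.drop y
    · exact absurd (List.prefix_of_prefix_length_le c0 c1 (by decide)) (by decide)
    · by_cases c2 : ['c', 'e', 'l', 'l', ' ', '('] <+: cs.drop y
      · exact absurd (List.prefix_of_prefix_length_le c0 c2 (by decide)) (by decide)
      · simp [c0, c1, c2]
  · by_cases c1 : ['*', '/'] <+: cs.drop y
    · by_cases c2 : ['c', 'e', 'l', 'l', ' ', '('] <+: cs.drop y
      · exact absurd (List.prefix_of_prefix_length_le c1 c2 (by decide)) (by decide)
      · simp [c0, c1, c2]
    · by_cases c2 : ['c', 'e', 'l', 'l', ' ', '('] <+: cs.drop y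
      · simp [c0, c1, c2]
      · simp [c0, c1, c2]

lemma pvAline_eq (lib_file : List String) (x : String) (cs : List Char)
    (st : List String × Int × List Int × Bool) :
    (List.range cs.length).foldl (pvAstep lib_file x cs) st =
      ((List.range cs.length).filter (pvHit cs)).foldl (pvCstep lib_file x cs) st := by
  rw [PySem.List.foldl_congr_mem (List.range cs.length) (pvAstep lib_file x cs)
    (fun st y => if pvHit cs y then pvCstep lib_file x cs st y else st) st
    (fun acc y _ => pvAstep_eq lib_file x cs acc y)]
  exact PySem.List.foldl_if_eq_foldl_filter (pvHit cs) (pvCstep lib_file x cs)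
    (List.range cs.length) st

-- the find-while loop of Source B collects exactly the match positions ≥ start, in order
lemma pvFindAll_eq (cs sub : List Char) (hsub : sub ≠ []) :
    ∀ (fuel start : Nat), start ≤ cs.length → cs.length + 1 - start ≤ fuel →
    pvFindAll cs sub fuel start =
      ((List.range' start (cs.length - start)).filter
        (fun y => decide (sub <+: cs.drop y))).map (fun y => ((y : Nat) : Int)) := by
  intro fuel
  induction fuel with
  | zero => intro start h1 h2; omega
  | succ fuel ih =>
    intro start h1 h2
    unfold pvFindAll
    rw [PySem.Chars.findFrom_natCast cs sub start h1]
    by_cases hr : PySem.Chars.find (List.drop start cs) sub = -1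
    · rw [if_pos (by rw [hr]; rfl)]
      symm
      rw [List.map_eq_nil_iff, List.filter_eq_nil_iff]
      intro y hy hpy
      obtain ⟨hy1, hy2⟩ := List.mem_range'_1.mp hy
      have hpy' : sub <+: (List.drop start cs).drop (y - start) := by
        rw [List.drop_drop]
        have : start + (y - start) = y := by omega
        rw [this]
        exact of_decide_eq_true hpy
      exact (PySem.Chars.find_eq_neg_one_iff _ _).mp hr
        (hpy'.isInfix.trans ((List.drop_suffix _ _).isInfix))
    · have hge : 0 ≤ PySem.Chars.find (List.drop start cs) sub := by
        have := PySem.Chars.neg_one_le_find (List.drop start cs) sub; omega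
      obtain ⟨hpre, hmin⟩ := PySem.Chars.find_spec (s := List.drop start cs) (sub := sub) hge
      set r := PySem.Chars.find (List.drop start cs) sub with hrdef
      rw [if_neg hr, if_neg (show ¬((start : Int) + r = -1) by omega)]
      set m := start + r.toNat with hmdef
      have hm : ((start : Int) + r).toNat = m := by omega
      have hcast : (start : Int) + r = (m : Int) := by omega
      have hmpre : sub <+: cs.drop m := by
        rw [hmdef, ← List.drop_drop]
        exact hpre
      have hmlt : m < cs.length := by
        by_contra hcon
        have hnil : cs.drop m = [] := List.drop_eq_nil_iff.mpr (by omega)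
        rw [hnil] at hmpre
        exact hsub (List.prefix_nil.mp hmpre)
      have hsplit : List.range' start (cs.length - start) =
          List.range' start (m - start) ++ List.range' m (cs.length - m) := by
        have h := @List.range'_append_1 start (m - start) (cs.length - m)
        rw [show start + (m - start) = m by omega] at h
        rw [show m - start + (cs.length - m) = cs.length - start by omega] at h
        exact h.symm
      have hfilt1 : (List.range' start (m - start)).filter (fun y => decide (sub <+: cs.drop y)) = [] := by
        rw [List.filter_eq_nil_iff]
        intro y hy hpy
        obtain ⟨hy1, hy2⟩ := List.mem_range'_1.mp hy
        refine hmin (y - start) (by omega) ?_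
        rw [List.drop_drop]
        rw [show start + (y - start) = y by omega]
        exact of_decide_eq_true hpy
      have hrange2 : List.range' m (cs.length - m) = m :: List.range' (m + 1) (cs.length - m - 1) := by
        rw [show cs.length - m = (cs.length - m - 1) + 1 by omega, List.range'_succ]
        simp
      rw [hsplit, List.filter_append, List.map_append, hfilt1, hrange2]
      simp only [List.map_nil, List.nil_append, List.filter_cons, hmpre, decide_true, if_true,
        List.map_cons]
      rw [hm, hcast, ih (m + 1) (by omega) (by omega)]
      rw [show cs.length - (m + 1) = cs.length - m - 1 by omega]

-- the concatenated tagged hit lists are a permutation of the merged tagged hit list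
lemma pvPerm (cs : List Char) (l : List Nat) :
    List.Perm
      ((l.filter (fun y => decide (['/', '*'] <+: cs.drop y))).map (fun (y : Nat) => ((y : Int), (0 : Int)))
        ++ (l.filter (fun y => decide (['*', '/'] <+: cs.drop y))).map (fun (y : Nat) => ((y : Int), (1 : Int)))
        ++ (l.filter (fun y => decide (['c', 'e', 'l', 'l', ' ', '('] <+: cs.drop y))).map (fun (y : Nat) => ((y : Int), (2 : Int))))
      ((l.filter (pvHit cs)).map (pvTag cs)) := by
  induction l with
  | nil => simp
  | cons a l ih =>
    by_cases c0 : ['/', '*'] <+: cs.drop a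
    · by_cases c1 : ['*', '/'] <+: cs.drop a
      · exact absurd (List.prefix_of_prefix_length_le c0 c1 (by decide)) (by decide)
      · by_cases c2 : ['c', 'e', 'l', 'l', ' ', '('] <+: cs.drop a
        · exact absurd (List.prefix_of_prefix_length_le c0 c2 (by decide)) (by decide)
        · have hh : pvHit cs a = true := by simp [pvHit, c0]
          have htag : pvTag cs a = ((a : Int), 0) := by simp [pvTag, pvKind, c0]
          simp only [List.filter_cons, hh, c0, c1, c2, decide_true, decide_false, if_true, if_false,
            Bool.false_eq_true, List.map_cons, List.cons_append, htag]
          exact ih.cons _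
    · by_cases c1 : ['*', '/'] <+: cs.drop a
      · by_cases c2 : ['c', 'e', 'l', 'l', ' ', '('] <+: cs.drop a
        · exact absurd (List.prefix_of_prefix_length_le c1 c2 (by decide)) (by decide)
        · have hh : pvHit cs a = true := by simp [pvHit, c1]
          have htag : pvTag cs a = ((a : Int), 1) := by simp [pvTag, pvKind, c0, c1]
          simp only [List.filter_cons, hh, c0, c1, c2, decide_true, decide_false, if_true, if_false,
            Bool.false_eq_true, List.map_cons, htag]
          rw [List.append_assoc, List.cons_append]
          refine List.perm_middle.trans ?_
          rw [← List.append_assoc]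
          exact ih.cons _
      · by_cases c2 : ['c', 'e', 'l', 'l', ' ', '('] <+: cs.drop a
        · have hh : pvHit cs a = true := by simp [pvHit, c2]
          have htag : pvTag cs a = ((a : Int), 2) := by simp [pvTag, pvKind, c0, c1]
          simp only [List.filter_cons, hh, c0, c1, c2, decide_true, decide_false, if_true, if_false,
            Bool.false_eq_true, List.map_cons, htag]
          refine List.perm_middle.trans ?_
          exact ih.cons _
        · have hh : pvHit cs a = false := by simp [pvHit, c0, c1, c2]
          simp only [List.filter_cons, hh, c0, c1, c2, decide_false, Bool.false_eq_true, if_false]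
          exact ih

-- the sorted event list is the merged tagged hit list
lemma pvSorted_eq (cs : List Char) :
    PySem.List.sorted
      ([((['/', '*'] : List Char), (0 : Int)), (['*', '/'], 1), (['c', 'e', 'l', 'l', ' ', '('], 2)].foldl
        (fun acc mk => acc ++ (pvFindAll cs mk.1 (cs.length + 1) 0).map (fun p => (p, mk.2))) [])
      (fun e => e.1) false =
    ((List.range cs.length).filter (pvHit cs)).map (pvTag cs) := by
  have hfa : ∀ (sub : List Char), sub ≠ [] →
      pvFindAll cs sub (cs.length + 1) 0 =
        ((List.range cs.length).filter (fun y => decide (sub <+: cs.drop y))).map (fun y => ((y : Nat) : Int)) := by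
    intro sub hsub
    rw [pvFindAll_eq cs sub hsub (cs.length + 1) 0 (by omega) (by omega), Nat.sub_zero,
      ← List.range_eq_range']
  apply PySem.List.sorted_eq_of_perm_of_pairwise_lt
  · simp only [List.foldl_cons, List.foldl_nil, List.nil_append]
    rw [hfa ['/', '*'] (by decide), hfa ['*', '/'] (by decide), hfa ['c', 'e', 'l', 'l', ' ', '('] (by decide)]
    simp only [List.map_map]
    exact (pvPerm cs (List.range cs.length)).symm
  · have hp : ((List.range cs.length).filter (pvHit cs)).Pairwise (· < ·) :=
      List.Pairwise.filter (pvHit cs) List.pairwise_lt_range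
    refine List.Pairwise.map (pvTag cs) ?_ hp
    intro a b hab
    simp only [pvTag]
    exact_mod_cast hab

-- state simulation through a fold
lemma pv_foldl_proj {α β γ : Type} (proj : α → β) (f : α → γ → α) (g : β → γ → β)
    (l : List γ) (h : ∀ st c, c ∈ l → proj (f st c) = g (proj st) c) :
    ∀ s : α, proj (l.foldl f s) = l.foldl g (proj s) := by
  induction l with
  | nil => intro s; rfl
  | cons a l ih =>
    intro s
    simp only [List.foldl_cons]
    rw [← h s a (by simp)]
    exact ih (fun st c hc => h st c (by simp [hc])) (f s a)

-- the two per-hit steps agree through the projection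
lemma pvstep_proj (lib_file : List String) (x : String) (cs : List Char)
    (st : List String × Int × List Int × Bool) (y : Nat) :
    pvProj (pvCstep lib_file x cs st y) = pvBstep lib_file x cs (pvProj st) (pvTag cs y) := by
  unfold pvCstep pvBstep pvProj pvTag pvKind
  by_cases c0 : ['/', '*'] <+: cs.drop y
  · simp [c0]
  · by_cases c1 : ['*', '/'] <+: cs.drop y
    · simp [c0, c1]
    · by_cases hf : st.2.2.2 = false
      · simp [c0, c1, hf]
      · simp [c0, c1, hf]

-- the whole per-line bodies agree through the projection
lemma pvline_proj (lib_file : List String) (x : String)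
    (st : List String × Int × List Int × Bool) :
    pvProj ((List.range x.toList.length).foldl (pvAstep lib_file x x.toList) st) =
      (PySem.List.sorted
        ([((['/', '*'] : List Char), (0 : Int)), (['*', '/'], 1), (['c', 'e', 'l', 'l', ' ', '('], 2)].foldl
          (fun acc mk => acc ++ (pvFindAll x.toList mk.1 (x.toList.length + 1) 0).map (fun p => (p, mk.2))) [])
        (fun e => e.1) false).foldl (pvBstep lib_file x x.toList) (pvProj st) := by
  rw [pvAline_eq, pvSorted_eq, List.foldl_map]
  exact pv_foldl_proj pvProj (pvCstep lib_file x x.toList)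
    (fun st y => pvBstep lib_file x x.toList st (pvTag x.toList y))
    _ (fun st y _ => pvstep_proj lib_file x x.toList st y) st

-- ===== VERDICT (by name: the statement is the Claim_ definition above) =====
theorem get_cell_names_spec : Claim_equal_get_cell_names := by
  intro lib_file _
  unfold Spec_get_cell_names
  rw [pv_A_eq, pv_B_eq]
  have h := pv_foldl_proj pvProj
    (fun st x => (List.range x.toList.length).foldl (pvAstep lib_file x x.toList) st)
    (fun st x => (PySem.List.sorted
        ([((['/', '*'] : List Char), (0 : Int)), (['*', '/'], 1), (['c', 'e', 'l', 'l', ' ', '('], 2)].foldl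
          (fun acc mk => acc ++ (pvFindAll x.toList mk.1 (x.toList.length + 1) 0).map (fun p => (p, mk.2))) [])
        (fun e => e.1) false).foldl (pvBstep lib_file x x.toList) st)
    lib_file (fun st x _ => pvline_proj lib_file x st)
    (([] : List String), (0 : Int), ([] : List Int), false)
  simp only [pvProj] at h
  rw [← h]
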